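-- pv_equiv track=rewrite | github.com/MichealKrugman/CreditLinker | SDK/rules_engine/normalization.py | _fix_zero_o_confusion
-- ===== SOURCE A (Python) =====
-- def _fix_zero_o_confusion(text: str) -> str:
--     """
--     Fix O/0 confusion in amounts
--     Rule: If surrounded by digits, it's likely 0
--     """
--     result = []
--     for i, char in enumerate(text):
--         if char.upper() == 'O':
--             # Check context
--             prev_digit = i > 0 and text[i-1].isdigit()
--             next_digit = i < len(text)-1 and text[i+1].isdigit()
--
--             if prev_digit or next_digit:
--                 result.append('0')
--             else:
--                 result.append(char)
--         elif char == 'S' and i > 0 and text[i-1].isdigit():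
--             # S at end of number -> 5
--             result.append('5')
--         elif char == 'I' and i > 0 and text[i-1].isdigit():
--             # I in numbers -> 1
--             result.append('1')
--         else:
--             result.append(char)
--
--     return ''.join(result)
-- ===== SOURCE B (Python) =====
-- def _fix_zero_o_confusion(text: str) -> str:
--     # Run-decomposition: only characters adjacent to a maximal digit run can
--     # change, so scan the text as alternating non-digit stretch / digit run,
--     # patching the one character on each side of every run.
--     n = len(text)
--
--     def scan(pred, i):
--         while i < n and pred(text[i]):
--             i += 1
--         return i
--
--     pieces = []
--     i = 0
--     while True:
--         p = scan(lambda ch: not ch.isdigit(), i)   # end of non-digit stretch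
--         pre = text[i:p]
--         if p == n:
--             pieces.append(pre)
--             return ''.join(pieces)
--         if pre and pre[-1] in 'Oo':                # letter just before the run
--             pre = pre[:-1] + '0'
--         d = scan(str.isdigit, p)                   # end of digit run
--         if d == n:
--             pieces.append(pre + text[p:d])
--             return ''.join(pieces)
--         c = text[d]                                # letter just after the run
--         pieces.append(pre + text[p:d] +
--                       ('0' if c in 'Oo' else '5' if c == 'S' else '1' if c == 'I' else c))
--         i = d + 1
-- ===== Notes on version B (the rewrite author's own statement) =====
-- stated objective: alternative
-- what changed: A classifies every character with per-index neighbour lookups (text[i-1]/text[i+1]); B decomposes the text into alternating non-digit stretches and maximal digit runs and only patches the single character on each side of every run, copying everything else verbatim.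
import Mathlib
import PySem

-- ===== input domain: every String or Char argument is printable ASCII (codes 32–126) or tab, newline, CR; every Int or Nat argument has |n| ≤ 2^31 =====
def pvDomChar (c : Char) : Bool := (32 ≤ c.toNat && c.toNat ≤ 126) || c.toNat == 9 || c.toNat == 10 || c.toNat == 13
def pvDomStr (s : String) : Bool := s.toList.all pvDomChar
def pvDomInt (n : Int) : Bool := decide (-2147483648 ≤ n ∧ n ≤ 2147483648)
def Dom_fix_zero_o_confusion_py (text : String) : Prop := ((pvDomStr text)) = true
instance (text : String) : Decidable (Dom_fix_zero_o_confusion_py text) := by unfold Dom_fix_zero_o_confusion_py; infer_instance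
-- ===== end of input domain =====

-- B replaces A's per-character loop with neighbour indexing by a run decomposition:
-- the text is consumed as alternating non-digit stretches and maximal digit runs, and
-- only the single character on each side of a run is patched (objective: alternative).

-- ===== PORT A =====
-- one loop step of A: i = position, char = current char; looks back/ahead into the full text
def pvAStep (cs : List Char) (res : List Char) (ic : Int × Char) : List Char :=
  let i := ic.1
  let char := ic.2
  if PySem.Chars.upperChar char = 'O' then
    let prev_digit := decide (0 < i) && (PySem.List.pyGet? cs (i - 1)).elim false PySem.Chars.isdigit
    let next_digit := decide (i < (cs.length : Int) - 1) && (PySem.List.pyGet? cs (i + 1)).elim false PySem.Chars.isdigit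
    if prev_digit || next_digit then res ++ ['0'] else res ++ [char]
  else if char = 'S' && (decide (0 < i) && (PySem.List.pyGet? cs (i - 1)).elim false PySem.Chars.isdigit) then
    res ++ ['5']
  else if char = 'I' && (decide (0 < i) && (PySem.List.pyGet? cs (i - 1)).elim false PySem.Chars.isdigit) then
    res ++ ['1']
  else
    res ++ [char]

def fix_zero_o_confusion_py (text : String) : String :=
  let cs := text.toList
  let result := (PySem.List.enumerate cs 0).foldl (pvAStep cs) []
  String.ofList (PySem.Chars.join [] (result.map (fun c => [c])))

-- ===== PORT B =====
-- Source B's scan(pred, i): advance i while i < n and pred(text[i])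
def pvScan (cs : List Char) (pred : Char → Bool) (i : Nat) : Nat :=
  if h : i < cs.length then
    if pred cs[i] then pvScan cs pred (i + 1) else i
  else i
termination_by cs.length - i

-- termination fact for pvLoopB (cited by its decreasing_by)
lemma pvScan_le (cs : List Char) (pred : Char → Bool) : ∀ k i, cs.length - i ≤ k → i ≤ pvScan cs pred i := by
  intro k
  induction k with
  | zero =>
    intro i h
    rw [pvScan]
    split
    · omega
    · exact le_refl i
  | succ k ih =>
    intro i h
    rw [pvScan]
    split
    · split
      · exact le_trans (by omega) (ih (i + 1) (by omega))
      · exact le_refl i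
    · exact le_refl i

-- Source B's "pre = pre[:-1] + '0'" patch, guarded by "pre and pre[-1] in 'Oo'"
def pvPatch (pre : List Char) : List Char :=
  if !pre.isEmpty && (PySem.List.pyGet? pre (-1)).elim false (fun c => c = 'O' || c = 'o') then
    PySem.List.slice pre none (some (-1)) ++ ['0']
  else pre

-- Source B's inline conditional: the letter just after a digit run
def pvMapAfter (c : Char) : Char :=
  if c = 'O' || c = 'o' then '0' else if c = 'S' then '5' else if c = 'I' then '1' else c

-- Source B's main while-loop: i = current position, pieces = output chunks collected so far
def pvLoopB (cs : List Char) (pieces : List (List Char)) (i : Nat) : List (List Char) :=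
  let p := pvScan cs (fun ch => !PySem.Chars.isdigit ch) i
  let pre := PySem.List.slice cs (some (i : Int)) (some (p : Int))
  if p = cs.length then pieces ++ [pre]
  else
    let pre' := pvPatch pre
    let d := pvScan cs PySem.Chars.isdigit p
    if d = cs.length then pieces ++ [pre' ++ PySem.List.slice cs (some (p : Int)) (some (d : Int))]
    else if h : d < cs.length then
      -- index guard only (Python's text[d] is in range here: d ≠ n and d ≤ n)
      pvLoopB cs (pieces ++ [pre' ++ PySem.List.slice cs (some (p : Int)) (some (d : Int)) ++ [pvMapAfter cs[d]]]) (d + 1)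
    else pieces
termination_by cs.length - i
decreasing_by
  have h1 := pvScan_le cs (fun ch => !PySem.Chars.isdigit ch) cs.length i (by omega)
  have h2 := pvScan_le cs PySem.Chars.isdigit cs.length (pvScan cs (fun ch => !PySem.Chars.isdigit ch) i) (by omega)
  have hd : d = pvScan cs PySem.Chars.isdigit (pvScan cs (fun ch => !PySem.Chars.isdigit ch) i) := rfl
  rw [hd] at h
  omega

def fix_zero_o_confusion_py_alt (text : String) : String :=
  String.ofList (PySem.Chars.join [] (pvLoopB text.toList [] 0))

-- ===== PRECONDITION & SPEC =====
def Spec_fix_zero_o_confusion_py (text : String) (out : String) : Prop := out = fix_zero_o_confusion_py_alt text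
instance (text : String) (out : String) : Decidable (Spec_fix_zero_o_confusion_py text out) := by unfold Spec_fix_zero_o_confusion_py; infer_instance

-- ===== CLAIM (what is proved, stated in full; the proofs are below) =====
def Claim_equal_fix_zero_o_confusion_py : Prop := ∀ (text : String), Dom_fix_zero_o_confusion_py text → Spec_fix_zero_o_confusion_py text (fix_zero_o_confusion_py text)

-- ===== LEMMAS AND PROOFS =====

-- reference scan both ports are reduced to: prev = "previous char is a digit"
def pvGo (prev : Bool) : List Char → List Char
  | [] => []
  | c :: rest =>
    let nd := rest.head?.elim false PySem.Chars.isdigit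
    let r :=
      if (c = 'O' || c = 'o') && (prev || nd) then '0'
      else if c = 'S' && prev then '5'
      else if c = 'I' && prev then '1'
      else c
    r :: pvGo (PySem.Chars.isdigit c) rest

-- "text[i-1].isdigit() with the i > 0 guard", as a function of the Nat position
def pvPrevDig (full : List Char) (k : Nat) : Bool :=
  decide (0 < (k : Int)) && (PySem.List.pyGet? full ((k : Int) - 1)).elim false PySem.Chars.isdigit

lemma pvUpperChar_eq_O_iff (c : Char) :
    (PySem.Chars.upperChar c = 'O') ↔ (c = 'O' ∨ c = 'o') := by
  unfold PySem.Chars.upperChar PySem.Chars.islower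
  have hval : c.toNat = c.val.toNat := rfl
  split_ifs with h
  · simp only [Bool.and_eq_true, decide_eq_true_eq, Char.le_def, UInt32.le_iff_toNat_le] at h
    have h1 : 97 ≤ c.toNat := h.1
    have h2 : c.toNat ≤ 122 := h.2
    constructor
    · intro he
      right
      have hv : (c.toNat - 32).isValidChar := by
        constructor; omega
      have := congrArg Char.toNat he
      rw [Char.toNat_ofNat, if_pos hv] at this
      have hc : c.toNat = 111 := by
        have : (('O' : Char).toNat) = 79 := by decide
        omega
      have : c.val.toNat = ('o' : Char).val.toNat := by
        rw [← hval, hc]; decide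
      exact Char.ext (UInt32.toNat_inj.mp this)
    · rintro (rfl | rfl)
      · exact absurd h1 (by decide)
      · decide
  · simp only [Bool.and_eq_true, decide_eq_true_eq, not_and_or] at h
    constructor
    · intro he; left; exact he
    · rintro (rfl | rfl)
      · rfl
      · exact absurd h (by decide)

lemma pvA_fold (full : List Char) :
    ∀ (rest : List Char) (k : Nat) (acc : List Char), full.drop k = rest →
      (PySem.List.enumerate rest (k : Int)).foldl (pvAStep full) acc
        = acc ++ pvGo (pvPrevDig full k) rest := by
  intro rest
  induction rest with
  | nil => intro k acc _; simp [PySem.List.enumerate, pvGo]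
  | cons c rest' ih =>
    intro k acc hd
    rw [PySem.List.enumerate_cons, List.foldl_cons]
    have hk_lt : k < full.length := by
      have := congrArg List.length hd
      simp [List.length_drop] at this
      omega
    have hck : full[k]? = some c := by
      have h0 : (full.drop k)[0]? = some c := by rw [hd]; rfl
      rwa [List.getElem?_drop, Nat.add_zero] at h0
    have hdrop1 : full.drop (k+1) = rest' := by
      have := congrArg List.tail hd
      rwa [List.tail_drop] at this
    have hlen : full.length = k + 1 + rest'.length := by
      have := congrArg List.length hd
      simp [List.length_drop] at this
      omega
    have hnext : PySem.List.pyGet? full ((k : Int) + 1) = rest'[0]? := by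
      have hc : ((k : Int) + 1) = ((k + 1 : Nat) : Int) := by push_cast; ring
      rw [hc, PySem.List.pyGet?_natCast, ← hdrop1, List.getElem?_drop, Nat.add_zero]
    have hprev' : pvPrevDig full (k+1) = PySem.Chars.isdigit c := by
      unfold pvPrevDig
      have hc : ((k + 1 : Nat) : Int) - 1 = ((k : Nat) : Int) := by push_cast; ring
      rw [hc, PySem.List.pyGet?_natCast, hck]
      simp
    have hnd : (decide ((k : Int) < (full.length : Int) - 1)
          && (PySem.List.pyGet? full ((k : Int) + 1)).elim false PySem.Chars.isdigit)
        = rest'.head?.elim false PySem.Chars.isdigit := by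
      rw [hnext]
      clear ih hd hdrop1 hnext
      cases rest' with
      | nil => simp [hlen]
      | cons d r2 =>
        have hlt : ((k : Int) < (full.length : Int) - 1) := by
          rw [hlen]; push_cast [List.length_cons]; omega
        simp [hlt]
    have hstep : pvAStep full acc ((k : Int), c)
        = acc ++ [if (c = 'O' || c = 'o') && (pvPrevDig full k || rest'.head?.elim false PySem.Chars.isdigit) then '0'
                  else if c = 'S' && pvPrevDig full k then '5'
                  else if c = 'I' && pvPrevDig full k then '1'
                  else c] := by
      show (if PySem.Chars.upperChar c = 'O' then
              if (pvPrevDig full k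
                  || (decide ((k : Int) < (full.length : Int) - 1)
                      && (PySem.List.pyGet? full ((k : Int) + 1)).elim false PySem.Chars.isdigit)) = true
              then acc ++ ['0'] else acc ++ [c]
            else if (c = 'S' && pvPrevDig full k) = true then acc ++ ['5']
            else if (c = 'I' && pvPrevDig full k) = true then acc ++ ['1']
            else acc ++ [c]) = _
      rw [hnd]
      by_cases hO : PySem.Chars.upperChar c = 'O'
      · have hO' := (pvUpperChar_eq_O_iff c).mp hO
        have hcb : (c = 'O' || c = 'o') = true := by
          rcases hO' with rfl | rfl <;> simp
        rw [if_pos hO]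
        have hS : (decide (c = 'S')) = false := by rcases hO' with rfl | rfl <;> decide
        have hI : (decide (c = 'I')) = false := by rcases hO' with rfl | rfl <;> decide
        simp only [hcb, hS, hI, Bool.true_and, Bool.false_and, Bool.false_eq_true,
          if_false]
        split_ifs <;> rfl
      · have hO' : ¬ (c = 'O' ∨ c = 'o') := fun h => hO ((pvUpperChar_eq_O_iff c).mpr h)
        have hcb : (c = 'O' || c = 'o') = false := by
          simp only [Bool.or_eq_false_iff, decide_eq_false_iff_not]
          exact ⟨fun h => hO' (Or.inl h), fun h => hO' (Or.inr h)⟩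
        rw [if_neg hO]
        simp only [hcb, Bool.false_and, Bool.false_eq_true, if_false]
        split_ifs <;> rfl
    rw [hstep]
    have hcast : (k : Int) + 1 = ((k + 1 : Nat) : Int) := by push_cast; ring
    rw [hcast, ih (k+1) _ hdrop1, hprev']
    have hcons : pvGo (pvPrevDig full k) (c :: rest')
        = (if (c = 'O' || c = 'o') && (pvPrevDig full k || rest'.head?.elim false PySem.Chars.isdigit) then '0'
           else if c = 'S' && pvPrevDig full k then '5'
           else if c = 'I' && pvPrevDig full k then '1'
           else c) :: pvGo (PySem.Chars.isdigit c) rest' := rfl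
    rw [hcons]
    simp

-- ---- B-side lemmas ----

lemma pvJoin_nil_flatten (l : List (List Char)) : PySem.Chars.join [] l = l.flatten := by
  induction l with
  | nil => simp [PySem.Chars.join, List.intercalate]
  | cons x l ih =>
    cases l with
    | nil => simp [PySem.Chars.join, List.intercalate]
    | cons y l' =>
      rw [PySem.Chars.join_cons_cons, ih]
      simp

lemma pvJoin_nil_append (ps : List (List Char)) (x : List Char) :
    PySem.Chars.join [] (ps ++ [x]) = PySem.Chars.join [] ps ++ x := by
  rw [pvJoin_nil_flatten, pvJoin_nil_flatten, List.flatten_append]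
  simp

lemma pvDigit_ne (d : Char) (h : PySem.Chars.isdigit d = true) :
    d ≠ 'O' ∧ d ≠ 'o' ∧ d ≠ 'S' ∧ d ≠ 'I' := by
  refine ⟨?_, ?_, ?_, ?_⟩ <;> (intro rfl; revert h; decide)

lemma pvPyGet_neg_one (l : List Char) (h : l ≠ []) :
    PySem.List.pyGet? l (-1) = l.getLast? := by
  have hl : 0 < l.length := List.length_pos_iff.mpr h
  simp only [PySem.List.pyGet?, PySem.List.pyIdx?]
  rw [if_neg (by omega), if_pos (by omega)]
  simp [List.getLast?_eq_getElem?]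

lemma pvPatch_nil : pvPatch [] = [] := by simp [pvPatch]

lemma pvPatch_singleton (c : Char) :
    pvPatch [c] = if c = 'O' || c = 'o' then ['0'] else [c] := by
  unfold pvPatch
  rw [pvPyGet_neg_one [c] (by simp)]
  simp [PySem.List.slice_to_neg_one]

lemma pvPatch_cons_cons (a b : Char) (l : List Char) :
    pvPatch (a :: b :: l) = a :: pvPatch (b :: l) := by
  unfold pvPatch
  rw [pvPyGet_neg_one (a :: b :: l) (by simp), pvPyGet_neg_one (b :: l) (by simp)]
  rw [PySem.List.slice_to_neg_one, PySem.List.slice_to_neg_one]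
  rw [List.getLast?_cons_cons]
  simp only [List.isEmpty_cons, Bool.not_false, Bool.true_and]
  split
  · rw [List.dropLast_cons₂]
    simp
  · rfl

-- scanning a non-digit stretch: only its last character can change, and only
-- when the remainder starts with a digit
lemma pvGo_prefix (pre rest : List Char)
    (hnd : ∀ c ∈ pre, PySem.Chars.isdigit c = false) :
    pvGo false (pre ++ rest)
      = (if rest.head?.elim false PySem.Chars.isdigit then pvPatch pre else pre)
          ++ pvGo false rest := by
  induction pre with
  | nil => simp [pvPatch_nil]
  | cons c pre' ih =>
    have hc : PySem.Chars.isdigit c = false := hnd c (by simp)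
    cases pre' with
    | nil =>
      show pvGo false (c :: rest) = _
      have hstep : pvGo false (c :: rest)
          = (if (c = 'O' || c = 'o') && (false || rest.head?.elim false PySem.Chars.isdigit) then '0'
             else if c = 'S' && false then '5'
             else if c = 'I' && false then '1'
             else c) :: pvGo (PySem.Chars.isdigit c) rest := rfl
      rw [hstep, hc, pvPatch_singleton]
      by_cases hh : rest.head?.elim false PySem.Chars.isdigit = true
      · rw [hh]
        simp only [Bool.or_false, Bool.false_or, Bool.and_true, Bool.and_false,
          Bool.false_eq_true, if_false, if_true]
        split <;> simp_all
      · rw [Bool.not_eq_true] at hh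
        rw [hh]
        simp
    | cons c' pre'' =>
      have hc' : PySem.Chars.isdigit c' = false := hnd c' (by simp)
      have hstep : pvGo false ((c :: c' :: pre'') ++ rest)
          = (if (c = 'O' || c = 'o') && (false || ((c' :: pre'' ++ rest).head?.elim false PySem.Chars.isdigit)) then '0'
             else if c = 'S' && false then '5'
             else if c = 'I' && false then '1'
             else c) :: pvGo (PySem.Chars.isdigit c) ((c' :: pre'') ++ rest) := rfl
      rw [hstep, hc]
      have hh : ((c' :: pre'' ++ rest).head?.elim false PySem.Chars.isdigit) = false := by
        simp [hc']
      rw [hh]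
      simp only [Bool.or_false, Bool.and_false, Bool.false_eq_true, if_false]
      rw [ih (fun x hx => hnd x (by simp [hx]))]
      rw [pvPatch_cons_cons]
      split <;> simp

-- scanning a digit run: digits are copied verbatim and the prev-digit flag becomes true
lemma pvGo_run (ds : List Char) :
    ∀ (prev : Bool) (rest : List Char), (∀ c ∈ ds, PySem.Chars.isdigit c = true) →
      pvGo prev (ds ++ rest) = ds ++ pvGo (if ds.isEmpty then prev else true) rest := by
  induction ds with
  | nil => intro prev rest _; simp
  | cons d ds' ih =>
    intro prev rest hall
    have hd : PySem.Chars.isdigit d = true := hall d (by simp)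
    obtain ⟨h1, h2, h3, h4⟩ := pvDigit_ne d hd
    have hstep : pvGo prev ((d :: ds') ++ rest)
        = (if (d = 'O' || d = 'o') && (prev || ((ds' ++ rest).head?.elim false PySem.Chars.isdigit)) then '0'
           else if d = 'S' && prev then '5'
           else if d = 'I' && prev then '1'
           else d) :: pvGo (PySem.Chars.isdigit d) (ds' ++ rest) := rfl
    rw [hstep, hd]
    have e1 : (decide (d = 'O') || decide (d = 'o')) = false := by simp [h1, h2]
    have e3 : (decide (d = 'S')) = false := by simp [h3]
    have e4 : (decide (d = 'I')) = false := by simp [h4]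
    simp only [e1, e3, e4, Bool.false_and, Bool.false_eq_true, if_false]
    rw [ih true rest (fun x hx => hall x (by simp [hx]))]
    cases ds' <;> simp

-- the character right after a digit run gets Source B's map
lemma pvGo_true_cons (c : Char) (t : List Char) :
    pvGo true (c :: t) = pvMapAfter c :: pvGo (PySem.Chars.isdigit c) t := by
  have hstep : pvGo true (c :: t)
      = (if (c = 'O' || c = 'o') && (true || (t.head?.elim false PySem.Chars.isdigit)) then '0'
         else if c = 'S' && true then '5'
         else if c = 'I' && true then '1'
         else c) :: pvGo (PySem.Chars.isdigit c) t := rfl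
  rw [hstep]
  unfold pvMapAfter
  simp

-- pvScan computes i + length of the takeWhile prefix of the suffix at i
lemma pvScan_eq_aux (cs : List Char) (pred : Char → Bool) :
    ∀ (k i : Nat), cs.length - i ≤ k →
      pvScan cs pred i = i + ((cs.drop i).takeWhile pred).length := by
  intro k
  induction k with
  | zero =>
    intro i h
    have hge : cs.length ≤ i := by omega
    rw [pvScan, dif_neg (by omega), List.drop_eq_nil_of_le hge]
    simp
  | succ k ih =>
    intro i h
    rw [pvScan]
    by_cases hi : i < cs.length
    · rw [dif_pos hi, List.drop_eq_getElem_cons hi, List.takeWhile_cons]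
      by_cases hp : pred cs[i] = true
      · rw [if_pos hp, hp, if_pos rfl, ih (i + 1) (by omega)]
        simp only [List.length_cons]
        omega
      · rw [Bool.not_eq_true] at hp
        rw [if_neg (by simp [hp]), hp]
        simp
    · rw [dif_neg hi, List.drop_eq_nil_of_le (by omega)]
      simp

lemma pvScan_eq (cs : List Char) (pred : Char → Bool) (i : Nat) :
    pvScan cs pred i = i + ((cs.drop i).takeWhile pred).length :=
  pvScan_eq_aux cs pred cs.length i (by omega)

lemma pvTake_drop_tw {p : Char → Bool} (t : List Char) :
    t.take (t.takeWhile p).length = t.takeWhile p := by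
  have h : t.take (t.takeWhile p).length
      = (t.takeWhile p ++ t.dropWhile p).take (t.takeWhile p).length := by
    rw [List.takeWhile_append_dropWhile]
  rw [h, List.take_left]
lemma pvDrop_drop_tw {p : Char → Bool} (t : List Char) :
    t.drop (t.takeWhile p).length = t.dropWhile p := by
  have h : t.drop (t.takeWhile p).length
      = (t.takeWhile p ++ t.dropWhile p).drop (t.takeWhile p).length := by
    rw [List.takeWhile_append_dropWhile]
  rw [h, List.drop_left]
lemma pvLen_tw_dw {p : Char → Bool} (t : List Char) :
    (t.takeWhile p).length + (t.dropWhile p).length = t.length := by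
  have h := congrArg List.length (List.takeWhile_append_dropWhile (p := p) (l := t))
  simp only [List.length_append] at h
  omega

lemma pvDropWhile_head_false {p : Char → Bool} {l : List Char} {c : Char} {r : List Char}
    (h : l.dropWhile p = c :: r) : p c = false := by
  have hne : l.dropWhile p ≠ [] := by rw [h]; simp
  have h1 := List.head_dropWhile_not p hne
  have h2 : (l.dropWhile p).head hne = c := by
    have h3 := congrArg List.head? h
    rw [List.head?_cons, List.head?_eq_some_head hne] at h3
    exact Option.some.inj h3
  rw [h2] at h1
  exact h1

-- main loop invariant: joining the output of pvLoopB appends pvGo over the suffix at i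
lemma pvLoopB_join (cs : List Char) :
    ∀ (k i : Nat) (pieces : List (List Char)), cs.length - i ≤ k → i ≤ cs.length →
      PySem.Chars.join [] (pvLoopB cs pieces i)
        = PySem.Chars.join [] pieces ++ pvGo false (cs.drop i) := by
  intro k
  induction k with
  | zero =>
    intro i pieces hk hi
    have hie : i = cs.length := by omega
    subst hie
    rw [pvLoopB.eq_def]
    have hp : pvScan cs (fun ch => !PySem.Chars.isdigit ch) cs.length = cs.length := by
      rw [pvScan_eq, List.drop_length]; simp
    rw [hp, if_pos rfl, pvJoin_nil_append, List.drop_length]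
    have hsl : PySem.List.slice cs (some (cs.length : Int)) (some (cs.length : Int)) = [] := by
      rw [PySem.List.slice_natCast]
      simp
    rw [hsl]
    rfl
  | succ k ih =>
    intro i pieces hk hi
    rw [pvLoopB.eq_def]
    set t := cs.drop i with ht
    set tw := t.takeWhile (fun ch => !PySem.Chars.isdigit ch) with htw
    set dw := t.dropWhile (fun ch => !PySem.Chars.isdigit ch) with hdw
    have hlen_t : t.length = cs.length - i := by rw [ht, List.length_drop]
    have hp : pvScan cs (fun ch => !PySem.Chars.isdigit ch) i = i + tw.length := by
      rw [pvScan_eq, ← ht, ← htw]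
    have hpre : PySem.List.slice cs (some (i : Int)) (some ((i + tw.length : Nat) : Int)) = tw := by
      rw [PySem.List.slice_natCast, ← ht]
      have : i + tw.length - i = tw.length := by omega
      rw [this, pvTake_drop_tw]
    have hlen2 := pvLen_tw_dw (p := fun ch => !PySem.Chars.isdigit ch) t
    rw [← htw, ← hdw] at hlen2
    have hdropp : cs.drop (i + tw.length) = dw := by
      rw [← List.drop_drop, ← ht, pvDrop_drop_tw]
    have htw_nd : ∀ c ∈ tw, PySem.Chars.isdigit c = false := by
      intro c hc
      have := List.mem_takeWhile_imp (htw ▸ hc)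
      simpa using this
    rw [hp]
    by_cases hend : i + tw.length = cs.length
    · -- whole suffix is non-digit: dw = []
      have hdwnil : dw = [] := by
        have : dw.length = 0 := by omega
        exact List.length_eq_zero_iff.mp this
      rw [if_pos hend, hpre, pvJoin_nil_append]
      have : t = tw ++ [] := by
        rw [List.append_nil, htw, hdw] at *
        rw [htw]
        conv_lhs => rw [← List.takeWhile_append_dropWhile (p := fun ch => !PySem.Chars.isdigit ch) (l := t)]
        rw [← hdw, hdwnil, List.append_nil]
      rw [this, pvGo_prefix tw [] htw_nd]
      simp [pvGo]
    · rw [if_neg hend]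
      -- dw is nonempty and starts with a digit
      have hdwne : dw ≠ [] := by
        intro hnil
        rw [hnil] at hlen2
        simp at hlen2
        omega
      obtain ⟨c0, dwt, he⟩ : ∃ c0 dwt, dw = c0 :: dwt := by
        cases hcase : dw with
        | nil => exact absurd hcase hdwne
        | cons a b => exact ⟨a, b, rfl⟩
      have hc0 : PySem.Chars.isdigit c0 = true := by
        have h5 : t.dropWhile (fun ch => !PySem.Chars.isdigit ch) = c0 :: dwt := by
          rw [← hdw]; exact he
        have := pvDropWhile_head_false h5
        simpa using this
      set ds := dw.takeWhile PySem.Chars.isdigit with hds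
      set r2 := dw.dropWhile PySem.Chars.isdigit with hr2
      have hd : pvScan cs PySem.Chars.isdigit (i + tw.length) = i + tw.length + ds.length := by
        rw [pvScan_eq, hdropp, ← hds]
      have hds_all : ∀ c ∈ ds, PySem.Chars.isdigit c = true := by
        intro c hc
        exact List.mem_takeWhile_imp (hds ▸ hc)
      have hds_ne : ds ≠ [] := by
        rw [hds, he, List.takeWhile_cons, hc0]
        simp
      have hlen3 := pvLen_tw_dw (p := PySem.Chars.isdigit) dw
      rw [← hds, ← hr2] at hlen3
      have hdig_slice : PySem.List.slice cs (some ((i + tw.length : Nat) : Int)) (some ((i + tw.length + ds.length : Nat) : Int)) = ds := by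
        rw [PySem.List.slice_natCast, hdropp]
        have : i + tw.length + ds.length - (i + tw.length) = ds.length := by omega
        rw [this, pvTake_drop_tw]
      have hdropd : cs.drop (i + tw.length + ds.length) = r2 := by
        rw [← List.drop_drop, hdropp, pvDrop_drop_tw]
      -- decomposition of pvGo over the suffix
      have hsplit : t = tw ++ dw := by
        rw [htw, hdw, List.takeWhile_append_dropWhile]
      have hsplit2 : dw = ds ++ r2 := by
        rw [hds, hr2, List.takeWhile_append_dropWhile]
      have hgo : pvGo false t = pvPatch tw ++ (ds ++ pvGo true r2) := by
        rw [hsplit, pvGo_prefix tw dw htw_nd]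
        have hh : dw.head?.elim false PySem.Chars.isdigit = true := by
          rw [he, List.head?_cons]
          simpa using hc0
        rw [hh, if_pos rfl]
        congr 1
        rw [hsplit2, pvGo_run ds false r2 hds_all]
        have : ds.isEmpty = false := by simpa using hds_ne
        rw [this]
        simp
      rw [hd]
      by_cases hdn : i + tw.length + ds.length = cs.length
      · -- digits reach the end of the text: r2 = []
        have hr2nil : r2 = [] := by
          have h1 : r2.length = 0 := by
            have ha : (cs.drop (i + tw.length + ds.length)).length = 0 := by
              rw [hdn, List.drop_length]; rfl
            rw [hdropd] at ha
            exact ha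
          exact List.length_eq_zero_iff.mp h1
        rw [if_pos hdn, hpre, hdig_slice, pvJoin_nil_append]
        rw [hgo, hr2nil]
        simp [pvGo]
      · rw [if_neg hdn]
        have hdlt : i + tw.length + ds.length < cs.length := by
          have : ds.length ≤ dw.length := by omega
          omega
        rw [dif_pos hdlt]
        -- the character after the run
        have hr2cons : r2 = cs[i + tw.length + ds.length] :: cs.drop (i + tw.length + ds.length + 1) := by
          rw [← hdropd, List.drop_eq_getElem_cons hdlt]
        have hcnd : PySem.Chars.isdigit (cs[i + tw.length + ds.length]) = false := by
          have h6 : dw.dropWhile PySem.Chars.isdigit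
              = cs[i + tw.length + ds.length] :: cs.drop (i + tw.length + ds.length + 1) := by
            rw [← hr2]; exact hr2cons
          exact pvDropWhile_head_false h6
        rw [ih (i + tw.length + ds.length + 1) _ (by omega) (by omega)]
        rw [pvJoin_nil_append, hpre, hdig_slice, hgo]
        rw [hr2cons, pvGo_true_cons, hcnd]
        simp

-- ===== VERDICT (by name: the statement is the Claim_ definition above) =====
theorem fix_zero_o_confusion_py_spec : Claim_equal_fix_zero_o_confusion_py := by
  intro text _
  unfold Spec_fix_zero_o_confusion_py fix_zero_o_confusion_py fix_zero_o_confusion_py_alt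
  have hA := pvA_fold text.toList text.toList 0 [] (by simp)
  simp only [Int.natCast_zero] at hA
  have h0 : pvPrevDig text.toList 0 = false := by simp [pvPrevDig]
  have hB := pvLoopB_join text.toList text.toList.length 0 [] (by omega) (by omega)
  simp only [List.drop_zero] at hB
  dsimp only
  rw [hA, hB, h0, PySem.Chars.join_nil_singletons]
  rfl
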